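-- pv_equiv track=rewrite | github.com/elecxDev/Talk-to-your-PDF-main | streamlit_app.py | detect_malicious_intent
-- ===== SOURCE A (Python) =====
-- def detect_malicious_intent(question):
--     """
--     Simple keyword-based malicious intent detection (free alternative).
--
--     Args:
--         question (str): The user's question as a string.
--
--     Returns:
--         tuple: A boolean indicating if the question was flagged and a message explaining the result.
--     """
--     try:
--         # Simple keyword filtering for malicious content
--         malicious_keywords = ['hack', 'attack', 'exploit', 'malware', 'virus', 'illegal', 'bomb', 'weapon']
--         question_lower = question.lower()
--
--         is_flagged = any(keyword in question_lower for keyword in malicious_keywords)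
--
--         if is_flagged:
--             return True, "This question has been flagged for potentially inappropriate content..."
--         else:
--             return False, "No malicious intent detected..."
--     except Exception as e:
--         return None, f"Error in moderation: {str(e)}"
-- ===== SOURCE B (Python) =====
-- def detect_malicious_intent(question):
--     """Single left-to-right scan: at each position of the lowered string, check
--     whether any malicious keyword starts there (one pass over positions instead
--     of one full substring search per keyword)."""
--     keywords = ('hack', 'attack', 'exploit', 'malware', 'virus', 'illegal', 'bomb', 'weapon')
--     q = question.lower()
--     for i in range(len(q)):
--         if any(q.startswith(k, i) for k in keywords):
--             return True, "This question has been flagged for potentially inappropriate content..."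
--     return False, "No malicious intent detected..."
-- ===== Notes on version B (the rewrite author's own statement) =====
-- stated objective: alternative
-- what changed: Replaced the any-over-keywords substring-membership scan (and the try/except that only fires for non-string input, outside the stated domain) with a single positional scan that walks the lowered string once and tests at each index whether any keyword starts there.
import Mathlib
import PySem

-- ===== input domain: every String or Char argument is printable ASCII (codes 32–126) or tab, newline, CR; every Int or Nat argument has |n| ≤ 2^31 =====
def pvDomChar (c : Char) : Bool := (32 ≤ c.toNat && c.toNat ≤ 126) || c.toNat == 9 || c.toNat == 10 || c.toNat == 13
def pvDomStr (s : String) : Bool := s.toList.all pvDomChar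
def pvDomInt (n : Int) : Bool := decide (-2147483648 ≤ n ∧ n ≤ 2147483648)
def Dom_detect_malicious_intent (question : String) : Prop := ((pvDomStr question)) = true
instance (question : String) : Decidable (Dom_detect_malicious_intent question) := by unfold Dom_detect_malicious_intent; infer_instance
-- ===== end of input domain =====

-- B replaces A's per-keyword substring searches by one positional scan of the lowered string
-- (alternative decomposition, same cost). A's try/except only fires for non-string input,
-- which is outside the String type here, so neither port carries it and no Pre_ is needed.

-- ===== PORT A =====
def pvKeywordsA : List String :=
  ["hack", "attack", "exploit", "malware", "virus", "illegal", "bomb", "weapon"]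

def detect_malicious_intent (question : String) : Option Bool × String :=
  let question_lower := PySem.Str.lower question
  let is_flagged := pvKeywordsA.any (fun k => PySem.Str.isIn k question_lower)
  if is_flagged then
    (some true, "This question has been flagged for potentially inappropriate content...")
  else
    (some false, "No malicious intent detected...")

-- ===== PORT B =====
def pvKeywordsB : List (List Char) :=
  ["hack".toList, "attack".toList, "exploit".toList, "malware".toList,
   "virus".toList, "illegal".toList, "bomb".toList, "weapon".toList]

-- the positional loop of Source B: try each suffix position in turn
def pvScan : List Char → Bool
  | [] => false
  | c :: t =>
      (pvKeywordsB.any (fun k => PySem.Chars.startswith (c :: t) k)) || pvScan t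

def detect_malicious_intent_alt (question : String) : Option Bool × String :=
  if pvScan (PySem.Chars.lower question.toList) then
    (some true, "This question has been flagged for potentially inappropriate content...")
  else
    (some false, "No malicious intent detected...")

-- ===== PRECONDITION & SPEC =====
def Spec_detect_malicious_intent (question : String) (out : Option Bool × String) : Prop := out = detect_malicious_intent_alt question
instance (question : String) (out : Option Bool × String) : Decidable (Spec_detect_malicious_intent question out) := by unfold Spec_detect_malicious_intent; infer_instance

-- ===== CLAIM (what is proved, stated in full; the proofs are below) =====
def Claim_equal_detect_malicious_intent : Prop := ∀ (question : String), Dom_detect_malicious_intent question → Spec_detect_malicious_intent question (detect_malicious_intent question)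

-- ===== LEMMAS AND PROOFS =====

lemma pvScan_iff (cs : List Char) :
    pvScan cs = true ↔ ∃ k ∈ pvKeywordsB, ∃ j, k <+: cs.drop j := by
  induction cs with
  | nil =>
      simp only [pvScan, List.drop_nil]
      constructor
      · intro h; cases h
      · rintro ⟨k, hk, j, hp⟩
        have hne : k ≠ [] := by
          fin_cases hk <;> simp
        exact absurd (List.prefix_nil.mp hp) hne
  | cons c t ih =>
      simp only [pvScan, Bool.or_eq_true, List.any_eq_true, ih]
      constructor
      · rintro (⟨k, hk, hs⟩ | ⟨k, hk, j, hp⟩)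
        · exact ⟨k, hk, 0, by simpa using (PySem.Chars.startswith_iff (c :: t) k).mp hs⟩
        · exact ⟨k, hk, j + 1, by simpa using hp⟩
      · rintro ⟨k, hk, j, hp⟩
        cases j with
        | zero =>
            exact Or.inl ⟨k, hk, (PySem.Chars.startswith_iff (c :: t) k).mpr (by simpa using hp)⟩
        | succ j =>
            exact Or.inr ⟨k, hk, j, by simpa using hp⟩

lemma pvFlag_eq (cs : List Char) :
    pvKeywordsA.any (fun k => PySem.Chars.isIn k.toList cs) = pvScan cs := by
  have hmap : pvKeywordsA.map (fun k => k.toList) = pvKeywordsB := by decide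
  rcases Bool.eq_false_or_eq_true (pvScan cs) with h | h
  · rw [h]
    rw [pvScan_iff] at h
    obtain ⟨k, hk, j, hp⟩ := h
    rw [← hmap, List.mem_map] at hk
    obtain ⟨s, hs, rfl⟩ := hk
    rw [List.any_eq_true]
    exact ⟨s, hs, (PySem.Chars.exists_prefix_drop_iff_isIn s.toList cs).mp ⟨j, hp⟩⟩
  · rw [h]
    rw [← Bool.not_eq_true, pvScan_iff] at h
    rw [← Bool.not_eq_true]
    intro hc
    apply h
    rw [List.any_eq_true] at hc
    obtain ⟨k, hk, hin⟩ := hc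
    obtain ⟨j, hp⟩ := (PySem.Chars.exists_prefix_drop_iff_isIn k.toList cs).mpr hin
    exact ⟨k.toList, by rw [← hmap]; exact List.mem_map_of_mem hk, j, hp⟩

-- ===== VERDICT (by name: the statement is the Claim_ definition above) =====
theorem detect_malicious_intent_spec : Claim_equal_detect_malicious_intent := by
  intro question _
  show _ = _
  unfold detect_malicious_intent detect_malicious_intent_alt
  have hfun : (fun k => PySem.Str.isIn k (PySem.Str.lower question))
      = (fun k => PySem.Chars.isIn k.toList (PySem.Chars.lower question.toList)) := by
    funext k
    simp [pysem, PySem.Str.isIn]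
  simp only [hfun, pvFlag_eq]
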